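-- pv_equiv track=rewrite | github.com/Aniketsonii/Learning | Python/max_amplifiers.py | max_amplifiers
-- ===== SOURCE A (Python) =====
-- def max_amplifiers(M, A, S):
--     if S == 0:
--         return -1  # Cannot achieve signal strength 0 starting from 1
--
--     if S == 1:
--         return 0  # No amplifiers needed to achieve signal strength 1
--
--     max_amplifiers_used = -1
--
--     # Traverse each possible starting point
--     for start in range(M):
--         product = 1
--
--         # Check each possible subarray starting from `start`
--         for end in range(start, M):
--             if A[end] == 0:
--                 product = 1  # Reset product if we hit a zero
--                 break
--             product *= A[end]
--
--             if product == S: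
--                 max_amplifiers_used = max(max_amplifiers_used, end - start + 1)
--             elif product > S:
--                 break  # Stop early if product exceeds S
--
--     return max_amplifiers_used
-- ===== SOURCE B (Python) =====
-- def max_amplifiers(M, A, S):
--     if S == 0:
--         return -1
--     if S == 1:
--         return 0
--     best = -1
--     active = []  # (start, product of A[start..end]) for starts still alive
--     for end in range(M):
--         x = A[end]
--         if x == 0:
--             active = []
--             continue
--         nxt = []
--         for (st, p) in active + [(end, 1)]:
--             p *= x
--             if p == S:
--                 best = max(best, end - st + 1)
--             if p <= S:
--                 nxt.append((st, p))
--         active = nxt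
--     return best
-- ===== Notes on version B (the rewrite author's own statement) =====
-- stated objective: alternative
-- what changed: A restarts a product scan from every start index (nested loops); B makes one left-to-right pass over the indices, carrying the list of still-alive (start, product) windows, clearing it at zeros and dropping a window once its product exceeds S.
import Mathlib
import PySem

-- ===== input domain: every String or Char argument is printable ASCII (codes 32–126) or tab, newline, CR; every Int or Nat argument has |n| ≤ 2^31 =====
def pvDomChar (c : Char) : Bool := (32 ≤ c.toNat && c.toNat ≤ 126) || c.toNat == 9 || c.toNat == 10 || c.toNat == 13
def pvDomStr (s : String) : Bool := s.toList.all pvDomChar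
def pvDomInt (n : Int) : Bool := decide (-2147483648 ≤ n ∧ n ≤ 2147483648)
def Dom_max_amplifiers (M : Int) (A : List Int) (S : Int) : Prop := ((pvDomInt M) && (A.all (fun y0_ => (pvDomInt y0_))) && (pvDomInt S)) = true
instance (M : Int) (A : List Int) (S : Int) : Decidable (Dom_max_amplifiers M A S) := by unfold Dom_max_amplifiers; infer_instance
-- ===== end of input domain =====

-- B replaces A's restart-from-every-start nested scan by ONE left-to-right pass carrying the list
-- of still-alive (start, product) windows (objective: alternative; same worst-case cost).

-- ===== PORT A =====
-- inner loop of A: for `end` over the index list, `product` and `best` threaded;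
-- `none` from pyGet? is Python's IndexError (excluded by Pre_); a `break` returns `best`.
def aInner (A : List Int) (S start : Int) : List Int → Int → Int → Int
  | [], _, best => best
  | e :: rest, product, best =>
    match PySem.List.pyGet? A e with
    | none => best  -- IndexError in Python: outside Pre_
    | some x =>
      if x = 0 then best
      else
        let p := product * x
        if p = S then aInner A S start rest p (max best (e - start + 1))
        else if S < p then best
        else aInner A S start rest p best

def max_amplifiers (M : Int) (A : List Int) (S : Int) : Int :=
  if S = 0 then -1
  else if S = 1 then 0
  else
    (PySem.List.pyRange 0 M 1).foldl
      (fun best start => aInner A S start (PySem.List.pyRange start M 1) 1 best) (-1)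

-- ===== PORT B =====
-- one step of B's single pass: at index e, multiply every alive (start, product) pair (plus the
-- fresh start (e,1)) by A[e], record lengths where the product hits S, keep pairs with product ≤ S.
def bStep (A : List Int) (S : Int) (st : Int × List (Int × Int)) (e : Int) : Int × List (Int × Int) :=
  match PySem.List.pyGet? A e with
  | none => st  -- IndexError in Python: outside Pre_
  | some x =>
    if x = 0 then (st.1, [])
    else
      (st.2 ++ [(e, 1)]).foldl
        (fun (acc : Int × List (Int × Int)) (sp : Int × Int) =>
          let p := sp.2 * x
          let b := if p = S then max acc.1 (e - sp.1 + 1) else acc.1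
          if p ≤ S then (b, acc.2 ++ [(sp.1, p)]) else (b, acc.2))
        (st.1, [])

def max_amplifiers_alt (M : Int) (A : List Int) (S : Int) : Int :=
  if S = 0 then -1
  else if S = 1 then 0
  else ((PySem.List.pyRange 0 M 1).foldl (bStep A S) (-1, [])).1

-- ===== PRECONDITION & SPEC =====
-- Pre_ excludes exactly the inputs where Python A raises IndexError: S ∉ {0,1} together with
-- M > len(A) (the scan starting at index len(A) reads A[len(A)]).  B raises there too.
def Pre_max_amplifiers (M : Int) (A : List Int) (S : Int) : Prop :=
  S = 0 ∨ S = 1 ∨ M ≤ (A.length : Int)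
instance (M : Int) (A : List Int) (S : Int) : Decidable (Pre_max_amplifiers M A S) := by
  unfold Pre_max_amplifiers; infer_instance
def pvWitness_max_amplifiers : Int × List Int × Int := (4, [2, 3, 1, 6], 6)

def Spec_max_amplifiers (M : Int) (A : List Int) (S : Int) (out : Int) : Prop := out = max_amplifiers_alt M A S
instance (M : Int) (A : List Int) (S : Int) (out : Int) : Decidable (Spec_max_amplifiers M A S out) := by unfold Spec_max_amplifiers; infer_instance

-- ===== CLAIM (what is proved, stated in full; the proofs are below) =====
def Claim_equal_max_amplifiers : Prop := ∀ (M : Int) (A : List Int) (S : Int), Dom_max_amplifiers M A S → Pre_max_amplifiers M A S → Spec_max_amplifiers M A S (max_amplifiers M A S)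

-- ===== LEMMAS AND PROOFS =====

-- survival scan of A's inner loop: `some q` = the loop consumed the whole index list without
-- breaking, running product q; `none` = it broke (zero, overshoot, or IndexError).
def aSurv (A : List Int) (S : Int) : List Int → Int → Option Int
  | [], p => some p
  | e :: rest, p =>
    match PySem.List.pyGet? A e with
    | none => none
    | some x =>
      if x = 0 then none
      else
        let q := p * x
        if q = S then aSurv A S rest q
        else if S < q then none
        else aSurv A S rest q

theorem aInner_append (A : List Int) (S start : Int) (l l' : List Int) (p b : Int) :
    aInner A S start (l ++ l') p b =
      match aSurv A S l p with
      | none => aInner A S start l p b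
      | some q => aInner A S start l' q (aInner A S start l p b) := by
  induction l generalizing p b with
  | nil => simp [aSurv, aInner]
  | cons e rest ih =>
    simp only [List.cons_append, aInner, aSurv]
    cases hx : PySem.List.pyGet? A e with
    | none => simp
    | some x =>
      by_cases h0 : x = 0
      · simp [h0]
      · by_cases hS : p * x = S
        · simp only [h0, hS, if_pos, ite_false]
          simpa [h0, hS] using ih (p * x) (max b (e - start + 1))
        · by_cases hgt : S < p * x
          · simp [h0, hS, hgt]
          · simp only [h0, hS, hgt]
            simpa [h0, hS, hgt] using ih (p * x) b

theorem aSurv_append (A : List Int) (S : Int) (l l' : List Int) (p : Int) :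
    aSurv A S (l ++ l') p = (aSurv A S l p).bind (aSurv A S l') := by
  induction l generalizing p with
  | nil => simp [aSurv]
  | cons e rest ih =>
    simp only [List.cons_append, aSurv]
    cases hx : PySem.List.pyGet? A e with
    | none => simp
    | some x =>
      by_cases h0 : x = 0
      · simp [h0]
      · by_cases hS : p * x = S
        · simp [h0, hS, ih]
        · by_cases hgt : S < p * x
          · simp [h0, hS, hgt]
          · simp [h0, hS, hgt, ih]

theorem aInner_max (A : List Int) (S start : Int) (l : List Int) (p b1 b2 : Int) :
    aInner A S start l p (max b1 b2) = max b1 (aInner A S start l p b2) := by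
  induction l generalizing p b2 with
  | nil => simp [aInner]
  | cons e rest ih =>
    simp only [aInner]
    cases hx : PySem.List.pyGet? A e with
    | none => rfl
    | some x =>
      by_cases h0 : x = 0
      · simp [h0]
      · by_cases hS : p * x = S
        · simp only [h0, hS, ite_false, if_pos]
          rw [show max (max b1 b2) (e - start + 1) = max b1 (max b2 (e - start + 1)) from
            max_assoc b1 b2 (e - start + 1)]
          exact ih S (max b2 (e - start + 1))
        · by_cases hgt : S < p * x
          · simp [h0, hS, hgt]
          · simp [h0, hS, hgt, ih]

theorem aInner_eq_max (A : List Int) (S start : Int) (l : List Int) (p b : Int) (hb : -1 ≤ b) :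
    aInner A S start l p b = max b (aInner A S start l p (-1)) := by
  have := aInner_max A S start l p b (-1)
  rwa [max_eq_left hb] at this

theorem neg_one_le_aInner (A : List Int) (S start : Int) (l : List Int) (p b : Int) (hb : -1 ≤ b) :
    -1 ≤ aInner A S start l p b := by
  rw [aInner_eq_max A S start l p b hb]
  exact le_trans hb (le_max_left _ _)

-- the contribution of one extra index e with A[e] = x ≠ 0
theorem aInner_single (A : List Int) (S start e q b x : Int)
    (hx : PySem.List.pyGet? A e = some x) (h0 : x ≠ 0) :
    aInner A S start [e] q b = if q * x = S then max b (e - start + 1) else b := by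
  simp only [aInner, hx, h0, if_false]
  split_ifs with h1 h2 <;> rfl

theorem aInner_single_zero (A : List Int) (S start e q b x : Int)
    (hx : PySem.List.pyGet? A e = some x) (h0 : x = 0) :
    aInner A S start [e] q b = b := by
  simp [aInner, hx, h0]

theorem aSurv_single (A : List Int) (S e q x : Int)
    (hx : PySem.List.pyGet? A e = some x) (h0 : x ≠ 0) :
    aSurv A S [e] q = if q * x ≤ S then some (q * x) else none := by
  simp only [aSurv, hx, h0, if_false]
  split_ifs with h1 h2 h3 <;> first | rfl | simp [aSurv] | omega

theorem aSurv_single_zero (A : List Int) (S e q x : Int)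
    (hx : PySem.List.pyGet? A e = some x) (h0 : x = 0) :
    aSurv A S [e] q = none := by
  simp [aSurv, hx, h0]

-- per-start value of A's inner loop started from best = -1, with end bound N
def gVal (A : List Int) (S N st : Int) : Int :=
  aInner A S st (PySem.List.pyRange st N 1) 1 (-1)

-- surviving (start, product) pair of the scan from st with end bound N
def svPair (A : List Int) (S N st : Int) : Option (Int × Int) :=
  (aSurv A S (PySem.List.pyRange st N 1) 1).map (fun q => (st, q))

-- fold of A-style contributions = fold of max over the per-start values
theorem foldl_aInner_eq_foldl_max (A : List Int) (S N : Int)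
    (L : List Int) (b0 : Int) (hb : -1 ≤ b0) :
    L.foldl (fun best start => aInner A S start (PySem.List.pyRange start N 1) 1 best) b0
      = (L.map (gVal A S N)).foldl max b0 := by
  induction L generalizing b0 with
  | nil => rfl
  | cons st L ih =>
    simp only [List.foldl, List.map]
    rw [aInner_eq_max A S st _ 1 b0 hb]
    exact ih _ (le_trans hb (le_max_left _ _))

-- B's inner fold over pairs, split into its best component (a fold of max) and its list component
theorem bFold_split (S x e : Int) (pr : List (Int × Int)) (b0 : Int) (l0 : List (Int × Int)) (hb : -1 ≤ b0) :
    pr.foldl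
        (fun (acc : Int × List (Int × Int)) (sp : Int × Int) =>
          if sp.2 * x ≤ S then
            (if sp.2 * x = S then max acc.1 (e - sp.1 + 1) else acc.1, acc.2 ++ [(sp.1, sp.2 * x)])
          else (if sp.2 * x = S then max acc.1 (e - sp.1 + 1) else acc.1, acc.2))
        (b0, l0)
      = ((pr.map (fun sp => if sp.2 * x = S then e - sp.1 + 1 else -1)).foldl max b0,
         l0 ++ pr.filterMap (fun sp => if sp.2 * x ≤ S then some (sp.1, sp.2 * x) else none)) := by
  induction pr generalizing b0 l0 with
  | nil => simp
  | cons sp pr ih =>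
    simp only [List.foldl_cons, List.map_cons, List.filterMap_cons]
    by_cases hS : sp.2 * x = S
    · have hle : sp.2 * x ≤ S := le_of_eq hS
      rw [if_pos hle, if_pos hS, ih _ _ (le_trans hb (le_max_left _ _))]
      simp [hS]
    · by_cases hle : sp.2 * x ≤ S
      · rw [if_pos hle, if_neg hS, ih _ _ hb]
        simp [hS, hle, max_eq_left hb]
      · rw [if_neg hle, if_neg hS, ih _ _ hb]
        simp [hS, hle, max_eq_left hb]

-- generic fold-max transfer: drop the -1 entries that a filterMap drops
theorem foldl_max_filterMap {α β : Type} (L : List α) (g : α → Int) (h : α → Option β) (k : β → Int)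
    (hcons : ∀ a ∈ L, (h a = none → g a = -1) ∧ ∀ b, h a = some b → g a = k b)
    (b0 : Int) (hb : -1 ≤ b0) :
    (L.map g).foldl max b0 = ((L.filterMap h).map k).foldl max b0 := by
  induction L generalizing b0 with
  | nil => rfl
  | cons a L ih =>
    simp only [List.map, List.foldl, List.filterMap]
    cases hha : h a with
    | none =>
      rw [(hcons a (List.mem_cons_self)).1 hha, max_eq_left hb]
      exact ih (fun a ha => hcons a (List.mem_cons_of_mem _ ha)) b0 hb
    | some b =>
      rw [(hcons a (List.mem_cons_self)).2 b hha]
      simp only [List.map, List.foldl]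
      exact ih (fun a ha => hcons a (List.mem_cons_of_mem _ ha)) _ (le_trans hb (le_max_left _ _))

-- fold-max over a pointwise max of two lists = fold-max over their concatenation
theorem foldl_max_pointwise {α : Type} (L : List α) (f g : α → Int) (b0 : Int) :
    (L.map (fun a => max (f a) (g a))).foldl max b0 = (L.map f ++ L.map g).foldl max b0 := by
  induction L generalizing b0 with
  | nil => rfl
  | cons a L ih =>
    simp only [List.map_cons, List.foldl_cons, List.cons_append]
    rw [ih, List.Perm.foldl_op_eq (op := max) (a := max b0 (f a))
      (List.perm_middle (a := g a) (l₁ := L.map f) (l₂ := L.map g))]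
    simp only [List.foldl_cons]
    rw [← max_assoc]

-- A's fold with bound n, and the list of surviving windows, after ends 0..n-1
def fA (A : List Int) (S : Int) (n : Nat) : Int :=
  (PySem.List.pyRange 0 n 1).foldl
    (fun best start => aInner A S start (PySem.List.pyRange start (n : Int) 1) 1 best) (-1)

def actA (A : List Int) (S : Int) (n : Nat) : List (Int × Int) :=
  (PySem.List.pyRange 0 n 1).filterMap (svPair A S (n : Int))

theorem neg_one_le_fA (A : List Int) (S : Int) (n : Nat) : -1 ≤ fA A S n := by
  unfold fA
  rw [foldl_aInner_eq_foldl_max A S _ _ _ le_rfl]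
  exact (PySem.List.le_foldl_max _ _).1

theorem fA_eq_foldl_max (A : List Int) (S : Int) (n : Nat) :
    fA A S n = ((PySem.List.pyRange 0 n 1).map (gVal A S (n : Int))).foldl max (-1) := by
  unfold fA gVal
  exact foldl_aInner_eq_foldl_max A S _ _ _ le_rfl

-- per-start step lemmas, nonzero A[N]
theorem gVal_succ (A : List Int) (S x N st : Int) (hst : st ≤ N)
    (hx : PySem.List.pyGet? A N = some x) (h0 : x ≠ 0) :
    gVal A S (N + 1) st =
      max (gVal A S N st)
        (match aSurv A S (PySem.List.pyRange st N 1) 1 with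
          | none => -1
          | some q => if q * x = S then N - st + 1 else -1) := by
  unfold gVal
  rw [PySem.List.pyRange_one_succ_right hst, aInner_append]
  cases hs : aSurv A S (PySem.List.pyRange st N 1) 1 with
  | none => simp [max_eq_left (neg_one_le_aInner A S st _ 1 (-1) le_rfl)]
  | some q =>
    simp only
    rw [aInner_single A S st N q _ x hx h0]
    split_ifs with h1
    · rfl
    · exact (max_eq_left (neg_one_le_aInner A S st _ 1 (-1) le_rfl)).symm

theorem svPair_succ (A : List Int) (S x N st : Int) (hst : st ≤ N)
    (hx : PySem.List.pyGet? A N = some x) (h0 : x ≠ 0) :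
    svPair A S (N + 1) st =
      (svPair A S N st).bind
        (fun sp => if sp.2 * x ≤ S then some (sp.1, sp.2 * x) else none) := by
  unfold svPair
  rw [PySem.List.pyRange_one_succ_right hst, aSurv_append]
  cases hs : aSurv A S (PySem.List.pyRange st N 1) 1 with
  | none => simp
  | some q =>
    simp only [Option.bind_some, Option.map_some]
    rw [aSurv_single A S N q x hx h0]
    split_ifs with h1 <;> simp

-- per-start step lemmas, A[N] = 0
theorem aInner_succ_zero (A : List Int) (S x N st : Int) (hst : st ≤ N)
    (hx : PySem.List.pyGet? A N = some x) (h0 : x = 0) (b : Int) :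
    aInner A S st (PySem.List.pyRange st (N + 1) 1) 1 b
      = aInner A S st (PySem.List.pyRange st N 1) 1 b := by
  rw [PySem.List.pyRange_one_succ_right hst, aInner_append]
  cases hs : aSurv A S (PySem.List.pyRange st N 1) 1 with
  | none => rfl
  | some q => exact aInner_single_zero A S st N q _ x hx h0

theorem svPair_succ_zero (A : List Int) (S x N st : Int) (hst : st ≤ N)
    (hx : PySem.List.pyGet? A N = some x) (h0 : x = 0) :
    svPair A S (N + 1) st = none := by
  unfold svPair
  rw [PySem.List.pyRange_one_succ_right hst, aSurv_append]
  cases hs : aSurv A S (PySem.List.pyRange st N 1) 1 with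
  | none => simp
  | some q => simp [aSurv_single_zero A S N q x hx h0]

-- the single-pass invariant: after processing ends 0..n-1, B's state is
-- (A's answer with bound n, the surviving windows with their products)
theorem b_invariant (A : List Int) (S : Int) (n : Nat) (hn : n ≤ A.length) :
    (PySem.List.pyRange 0 n 1).foldl (bStep A S) (-1, []) = (fA A S n, actA A S n) := by
  induction n with
  | zero =>
    simp [fA, actA, PySem.List.pyRange_one_eq_nil (le_refl (0 : Int))]
  | succ n ih =>
    have hn' : n ≤ A.length := Nat.le_of_succ_le hn
    have hlen : n < A.length := hn
    obtain ⟨x, hx⟩ : ∃ x, PySem.List.pyGet? A (n : Int) = some x :=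
      ⟨_, PySem.List.pyGet?_ofNat A n hlen⟩
    have hcast : ((n + 1 : Nat) : Int) = (n : Int) + 1 := by push_cast; ring
    have hR : PySem.List.pyRange 0 ((n : Int) + 1) 1
        = PySem.List.pyRange 0 (n : Int) 1 ++ [(n : Int)] :=
      PySem.List.pyRange_one_succ_right (Int.natCast_nonneg n)
    rw [hcast, hR, List.foldl_append, ih hn']
    simp only [List.foldl]
    have hmemL : ∀ st ∈ PySem.List.pyRange 0 (n : Int) 1 ++ [(n : Int)], st ≤ (n : Int) := by
      intro st hst
      rcases List.mem_append.mp hst with h | h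
      · exact le_of_lt (PySem.List.mem_pyRange_one.mp h).2
      · simp at h; omega
    by_cases h0 : x = 0
    · -- A[n] = 0 : every window dies, best is unchanged
      have hbs : bStep A S (fA A S n, actA A S n) (n : Int) = (fA A S n, []) := by
        unfold bStep; rw [hx]; simp [h0]
      rw [hbs]
      have hfa : fA A S (n + 1) = fA A S n := by
        unfold fA
        rw [hcast, hR, List.foldl_append]
        rw [PySem.List.foldl_congr_mem _ _
          (fun best start => aInner A S start (PySem.List.pyRange start (n : Int) 1) 1 best) _
          (fun acc st hst => aInner_succ_zero A S x (n : Int) st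
            (le_of_lt (PySem.List.mem_pyRange_one.mp hst).2) hx h0 acc)]
        simp only [List.foldl]
        rw [PySem.List.pyRange_one_singleton, aInner_single_zero A S _ _ _ _ x hx h0]
      have hact : actA A S (n + 1) = [] := by
        unfold actA
        rw [hcast, hR]
        refine List.filterMap_eq_nil_iff.mpr (fun st hst => ?_)
        exact svPair_succ_zero A S x (n : Int) st (hmemL st hst) hx h0
      rw [hfa, hact]
    · -- A[n] = x ≠ 0 : one multiply-filter pass over the alive windows plus the fresh start
      have hbs : bStep A S (fA A S n, actA A S n) (n : Int) =
          (actA A S n ++ [((n : Int), (1 : Int))]).foldl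
            (fun (acc : Int × List (Int × Int)) (sp : Int × Int) =>
              if sp.2 * x ≤ S then
                (if sp.2 * x = S then max acc.1 ((n : Int) - sp.1 + 1) else acc.1,
                 acc.2 ++ [(sp.1, sp.2 * x)])
              else (if sp.2 * x = S then max acc.1 ((n : Int) - sp.1 + 1) else acc.1, acc.2))
            (fA A S n, []) := by
        unfold bStep; rw [hx]; simp only [h0, if_false]
      rw [hbs, bFold_split S x (n : Int) _ (fA A S n) [] (neg_one_le_fA A S n)]
      have hsvlast : svPair A S (n : Int) (n : Int) = some ((n : Int), (1 : Int)) := by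
        unfold svPair
        rw [PySem.List.pyRange_one_eq_nil (le_refl ((n : Int)))]
        rfl
      have hfm : (PySem.List.pyRange 0 (n : Int) 1 ++ [(n : Int)]).filterMap (svPair A S (n : Int))
          = actA A S n ++ [((n : Int), (1 : Int))] := by
        rw [List.filterMap_append]
        unfold actA
        simp [hsvlast]
      rw [Prod.mk.injEq]
      constructor
      · -- best component
        have h1 : fA A S (n + 1)
            = (((PySem.List.pyRange 0 (n : Int) 1 ++ [(n : Int)]).map
                (gVal A S ((n : Int) + 1))).foldl max (-1)) := by
          rw [fA_eq_foldl_max, hcast, hR]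
        rw [h1, List.map_congr_left (fun st hst =>
          gVal_succ A S x (n : Int) st (hmemL st hst) hx h0)]
        rw [foldl_max_pointwise, List.foldl_append]
        have h2 : ((PySem.List.pyRange 0 (n : Int) 1 ++ [(n : Int)]).map
            (gVal A S (n : Int))).foldl max (-1) = fA A S n := by
          rw [List.map_append, List.foldl_append]
          have hlast : gVal A S (n : Int) (n : Int) = -1 := by
            unfold gVal
            rw [PySem.List.pyRange_one_eq_nil (le_refl ((n : Int)))]
            rfl
          simp only [List.map, List.foldl, hlast]
          rw [max_eq_left, ← fA_eq_foldl_max]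
          rw [← fA_eq_foldl_max]
          exact neg_one_le_fA A S n
        rw [h2]
        rw [foldl_max_filterMap
          (PySem.List.pyRange 0 (n : Int) 1 ++ [(n : Int)])
          _ (svPair A S (n : Int))
          (fun sp => if sp.2 * x = S then (n : Int) - sp.1 + 1 else -1)
          ?_ (fA A S n) (neg_one_le_fA A S n)]
        · rw [hfm]
        · intro st _
          unfold svPair
          cases hs : aSurv A S (PySem.List.pyRange st (n : Int) 1) 1 with
          | none => simp
          | some q =>
            refine ⟨by simp, fun b hb => ?_⟩
            simp only [Option.map_some, Option.some.injEq] at hb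
            subst hb
            rfl
      · -- surviving-windows component
        have h3 : actA A S (n + 1)
            = (PySem.List.pyRange 0 (n : Int) 1 ++ [(n : Int)]).filterMap
                (svPair A S ((n : Int) + 1)) := by
          unfold actA
          rw [hcast, hR]
        rw [h3, List.filterMap_congr (fun st hst =>
          svPair_succ A S x (n : Int) st (hmemL st hst) hx h0)]
        rw [← List.filterMap_filterMap, hfm]
        simp

theorem max_amplifiers_eq (M : Int) (A : List Int) (S : Int)
    (hS0 : S ≠ 0) (hS1 : S ≠ 1) (hM : M ≤ (A.length : Int)) :
    max_amplifiers M A S = max_amplifiers_alt M A S := by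
  unfold max_amplifiers max_amplifiers_alt
  rw [if_neg hS0, if_neg hS1, if_neg hS0, if_neg hS1]
  by_cases h : M ≤ 0
  · rw [PySem.List.pyRange_one_eq_nil h]; rfl
  · obtain ⟨m, rfl⟩ : ∃ m : Nat, M = (m : Int) := ⟨M.toNat, by omega⟩
    have hm : m ≤ A.length := by exact_mod_cast hM
    rw [b_invariant A S m hm]
    rfl

-- ===== VERDICT (by name: the statement is the Claim_ definition above) =====
theorem max_amplifiers_spec : Claim_equal_max_amplifiers := by
  intro M A S _ hpre
  unfold Spec_max_amplifiers
  by_cases hS0 : S = 0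
  · simp [max_amplifiers, max_amplifiers_alt, hS0]
  by_cases hS1 : S = 1
  · simp [max_amplifiers, max_amplifiers_alt, hS1]
  have hM : M ≤ (A.length : Int) := by
    rcases hpre with h | h | h
    · exact absurd h hS0
    · exact absurd h hS1
    · exact h
  exact max_amplifiers_eq M A S hS0 hS1 hM
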